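-- pv_equiv track=rewrite | github.com/dmandache/my-iptv-playlist | list_available_channels.py | split_extinf
-- ===== SOURCE A (Python) =====
-- def split_extinf(extinf: str):
--     # EXTINF channel title starts after the first comma that is not inside quotes.
--     in_quotes = False
--     for idx, ch in enumerate(extinf):
--         if ch == '"':
--             in_quotes = not in_quotes
--         elif ch == "," and not in_quotes:
--             return extinf[:idx], extinf[idx + 1 :].strip()
--     return extinf, "Unknown"
-- ===== SOURCE B (Python) =====
-- def split_extinf(extinf: str):
--     # Split on '"': segments at even indices lie outside quotes; find the first
--     # comma in such a segment and cut there.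
--     offset = 0
--     for i, part in enumerate(extinf.split('"')):
--         if i % 2 == 0:
--             p = part.find(',')
--             if p != -1:
--                 idx = offset + p
--                 return extinf[:idx], extinf[idx + 1:].strip()
--         offset += len(part) + 1
--     return extinf, "Unknown"
-- ===== Notes on version B (the rewrite author's own statement) =====
-- stated objective: faster
-- what changed: Replaces the character-by-character Python loop with an in_quotes flag by splitting the line on the quote character once and searching only the even-indexed (outside-quotes) segments for the first comma with a running offset, pushing the per-character work into C-implemented str.split/str.find.
import Mathlib
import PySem

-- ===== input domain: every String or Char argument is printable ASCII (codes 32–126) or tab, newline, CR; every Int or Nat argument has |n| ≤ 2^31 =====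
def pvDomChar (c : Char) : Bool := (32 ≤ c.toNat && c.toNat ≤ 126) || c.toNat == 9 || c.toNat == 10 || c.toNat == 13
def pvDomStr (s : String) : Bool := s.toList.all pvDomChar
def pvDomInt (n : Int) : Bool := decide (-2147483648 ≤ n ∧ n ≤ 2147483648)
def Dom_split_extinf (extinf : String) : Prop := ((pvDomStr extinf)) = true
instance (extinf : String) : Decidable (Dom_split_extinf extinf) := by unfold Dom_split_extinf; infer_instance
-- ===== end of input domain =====

-- B replaces A's stateful character scan (in_quotes flag) by splitting on '"' and
-- searching only the even-indexed (outside-quotes) segments for the comma (objective: faster, measured).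

-- ===== PORT A =====
-- A: linear scan with an in_quotes flag; returns at the first comma seen outside quotes.
def splitA_go (full : List Char) : List Char → Nat → Bool → String × String
  | [], _, _ => (String.ofList full, "Unknown")
  | c :: cs, idx, inq =>
    if c = '"' then splitA_go full cs (idx + 1) (!inq)
    else if c = ',' ∧ inq = false then
      (String.ofList (PySem.Chars.slice full none (some (idx : Int))),
       String.ofList (PySem.Chars.strip (PySem.Chars.slice full (some ((idx : Int) + 1)) none)))
    else splitA_go full cs (idx + 1) inq

def split_extinf (extinf : String) : String × String :=
  splitA_go extinf.toList extinf.toList 0 false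

-- ===== PORT B =====
-- B: extinf.split('"'); walk the segments with a running offset, checking only even indices.
def splitB_go (full : List Char) : List (List Char) → Nat → Nat → String × String
  | [], _, _ => (String.ofList full, "Unknown")
  | part :: rest, i, offset =>
    if i % 2 = 0 then
      let p := PySem.Chars.find part [',']
      if p ≠ -1 then
        (String.ofList (PySem.Chars.slice full none (some ((offset : Int) + p))),
         String.ofList (PySem.Chars.strip (PySem.Chars.slice full (some ((offset : Int) + p + 1)) none)))
      else splitB_go full rest (i + 1) (offset + part.length + 1)
    else splitB_go full rest (i + 1) (offset + part.length + 1)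

def split_extinf_alt (extinf : String) : String × String :=
  splitB_go extinf.toList (PySem.Chars.splitOn extinf.toList ['"']) 0 0

-- ===== PRECONDITION & SPEC =====
def Spec_split_extinf (extinf : String) (out : String × String) : Prop := out = split_extinf_alt extinf
instance (extinf : String) (out : String × String) : Decidable (Spec_split_extinf extinf out) := by unfold Spec_split_extinf; infer_instance

-- ===== CLAIM (what is proved, stated in full; the proofs are below) =====
def Claim_equal_split_extinf : Prop := ∀ (extinf : String), Dom_split_extinf extinf → Spec_split_extinf extinf (split_extinf extinf)

-- ===== LEMMAS AND PROOFS =====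

/-- Recursive characterisation of splitting on a single character. -/
def splitRec (q : Char) : List Char → List (List Char)
  | [] => [[]]
  | c :: cs => if c = q then [] :: splitRec q cs else (splitRec q cs).modifyHead (c :: ·)

/-- Recursive characterisation of the index of the first occurrence of a character. -/
def findRec (q : Char) : List Char → Option Nat
  | [] => none
  | c :: cs => if c = q then some 0 else (findRec q cs).map (· + 1)

theorem modifyHead_id_eq {α : Type} (l : List α) : List.modifyHead (fun x => x) l = l := by
  cases l <;> simp

theorem splitRec_ne_nil (q : Char) (l : List Char) : splitRec q l ≠ [] := by
  cases l with
  | nil => simp [splitRec]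
  | cons c cs =>
    simp only [splitRec]
    split
    · simp
    · cases h : splitRec q cs with
      | nil => exact absurd h (splitRec_ne_nil q cs)
      | cons a as => simp

theorem splitOn_go_eq (q : Char) :
    ∀ (l : List Char) (fuel : Nat) (cur : List Char) (acc : List (List Char)),
      l.length < fuel →
      PySem.Chars.splitOn.go [q] fuel l cur acc =
        acc.reverse ++ (splitRec q l).modifyHead (cur.reverse ++ ·) := by
  intro l
  induction l with
  | nil =>
    intro fuel cur acc h
    match fuel, h with
    | fuel + 1, _ => simp [PySem.Chars.splitOn.go, splitRec]
  | cons c cs ih =>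
    intro fuel cur acc h
    match fuel, h with
    | fuel + 1, h =>
      have hf : cs.length < fuel := by simpa using h
      simp only [PySem.Chars.splitOn.go]
      by_cases hq : c = q
      · have hp : [q].isPrefixOf (c :: cs) = true := by simp [List.isPrefixOf, hq]
        rw [if_pos hp]
        simp only [List.length_cons, List.drop_succ_cons, List.length_nil, List.drop_zero]
        rw [ih fuel [] (cur.reverse :: acc) hf]
        simp [splitRec, hq, modifyHead_id_eq]
      · have hp : ¬ ([q].isPrefixOf (c :: cs) = true) := by simp [List.isPrefixOf]; intro h'; exact hq h'.symm
        rw [if_neg hp]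
        rw [ih fuel (c :: cur) acc hf]
        simp only [splitRec, if_neg hq]
        congr 1
        cases hs : splitRec q cs with
        | nil => exact absurd hs (splitRec_ne_nil q cs)
        | cons a as => simp

theorem splitOn_eq_splitRec (q : Char) (l : List Char) :
    PySem.Chars.splitOn l [q] = splitRec q l := by
  unfold PySem.Chars.splitOn
  rw [splitOn_go_eq q l (l.length + 1) [] [] (by omega)]
  simp [modifyHead_id_eq]

theorem find_go_eq (q : Char) :
    ∀ (l : List Char) (k : Nat),
      PySem.Chars.find.go [q] l k =
        match findRec q l with
        | some n => ((k + n : Nat) : Int)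
        | none => -1 := by
  intro l
  induction l with
  | nil => intro k; simp [PySem.Chars.find.go, findRec, List.isEmpty]
  | cons c cs ih =>
    intro k
    simp only [PySem.Chars.find.go, findRec]
    by_cases hq : c = q
    · have hp : [q].isPrefixOf (c :: cs) = true := by simp [List.isPrefixOf, hq]
      simp [hq]
    · have hp : ¬ ([q].isPrefixOf (c :: cs) = true) := by simp [List.isPrefixOf]; intro h'; exact hq h'.symm
      rw [if_neg hp, ih (k + 1), if_neg hq]
      cases hs : findRec q cs with
      | none => simp
      | some n => simp; ring

theorem find_eq_findRec (q : Char) (l : List Char) :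
    PySem.Chars.find l [q] =
      match findRec q l with
      | some n => (n : Int)
      | none => -1 := by
  unfold PySem.Chars.find
  rw [find_go_eq]
  cases findRec q l with
  | none => rfl
  | some n => simp

theorem parity_flip (i : Nat) : (decide ((i + 1) % 2 = 1)) = !(decide (i % 2 = 1)) := by
  by_cases h : i % 2 = 1
  · have h1 : ¬ ((i + 1) % 2 = 1) := by omega
    simp [h, h1]
  · have h1 : (i + 1) % 2 = 1 := by omega
    simp [h, h1]

theorem main_go (full : List Char) :
    ∀ (cs : List Char) (i idx : Nat) (inq : Bool), inq = decide (i % 2 = 1) →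
      splitA_go full cs idx inq = splitB_go full (splitRec '"' cs) i idx := by
  intro cs
  induction cs with
  | nil =>
    intro i idx inq _
    simp only [splitRec, splitA_go, splitB_go]
    by_cases hi : i % 2 = 0 <;>
      simp [hi, find_eq_findRec, findRec]
  | cons c cs ih =>
    intro i idx inq hinq
    by_cases hq : c = '"'
    · subst hq
      simp only [splitRec, splitA_go]
      rw [ih (i + 1) (idx + 1) (!inq) (by rw [hinq, parity_flip])]
      by_cases hi : i % 2 = 0 <;>
        simp [splitB_go, hi, find_eq_findRec, findRec]
    · have hsr : splitRec '"' (c :: cs) = (splitRec '"' cs).modifyHead (c :: ·) := by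
        simp [splitRec, hq]
      obtain ⟨part, rest, hps⟩ : ∃ part rest, splitRec '"' cs = part :: rest := by
        cases h : splitRec '"' cs with
        | nil => exact absurd h (splitRec_ne_nil _ cs)
        | cons a as => exact ⟨a, as, rfl⟩
      rw [hsr, hps]
      simp only [List.modifyHead]
      by_cases hi : i % 2 = 1
      · -- inside quotes: A skips the char, B skips the segment
        have hinq' : inq = true := by rw [hinq]; simp [hi]
        have hA : splitA_go full (c :: cs) idx inq = splitA_go full cs (idx + 1) inq := by
          simp [splitA_go, hq, hinq']
        rw [hA, ih i (idx + 1) inq hinq, hps]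
        have hi0 : ¬ (i % 2 = 0) := by omega
        simp only [splitB_go, if_neg hi0]
        congr 1
        simp only [List.length_cons]
        omega
      · -- outside quotes
        have hinq' : inq = false := by rw [hinq]; simp [hi]
        have hi0 : i % 2 = 0 := by omega
        by_cases hc : c = ','
        · subst hc
          have hfind : PySem.Chars.find (',' :: part) [','] = (0 : Int) := by
            rw [find_eq_findRec]; simp [findRec]
          simp [splitA_go, hq, hinq', splitB_go, hi0, hfind]
        · have hA : splitA_go full (c :: cs) idx inq = splitA_go full cs (idx + 1) inq := by
            simp [splitA_go, hq, hinq', hc]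
          rw [hA, ih i (idx + 1) inq hinq, hps]
          have hfind : PySem.Chars.find (c :: part) [','] =
              match findRec ',' part with
              | some n => ((n : Int) + 1)
              | none => -1 := by
            rw [find_eq_findRec]
            simp only [findRec, if_neg hc]
            cases findRec ',' part <;> simp
          cases hfp : findRec ',' part with
          | some n =>
            have h1 : PySem.Chars.find part [','] = (n : Int) := by
              rw [find_eq_findRec, hfp]
            simp only [splitB_go, if_pos hi0, hfind, hfp, h1]
            have hne1 : ((n : Int) + 1) ≠ -1 := by omega
            have hne2 : (n : Int) ≠ -1 := by omega
            simp only [if_pos (by exact hne1), ne_eq, hne2, not_false_eq_true, if_pos]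
            have e1 : (idx : Int) + ((n : Int) + 1) = ((idx + 1 : Nat) : Int) + (n : Int) := by push_cast; ring
            rw [e1]
          | none =>
            have h1 : PySem.Chars.find part [','] = (-1 : Int) := by
              rw [find_eq_findRec, hfp]
            simp only [splitB_go, if_pos hi0, hfind, hfp, h1]
            simp only [ne_eq, not_true_eq_false, if_false]
            congr 1
            simp only [List.length_cons]
            omega

-- ===== VERDICT (by name: the statement is the Claim_ definition above) =====
theorem split_extinf_spec : Claim_equal_split_extinf := by
  intro extinf _
  unfold Spec_split_extinf split_extinf split_extinf_alt
  rw [splitOn_eq_splitRec]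
  exact main_go extinf.toList extinf.toList 0 0 false (by decide)
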